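-- pv_equiv track=rewrite | github.com/JaredBears/Formation-Python | MergeSentences.py | solution
-- ===== SOURCE A (Python) =====
-- def solution(string1, string2):
--     if not string1: return string2
--     if not string2: return string1
--     s1 = string1.split(" ")
--     s2 = string2.split(" ")
--     answer = []
--     i = 0
--     j = 0
--     while i < len(s1) or j < len(s2):
--         if i < len(s1):
--             answer.append(s1[i])
--             i += 1
--         if j < len(s2):
--             answer.append(s2[j])
--             j += 1
--     return " ".join(answer)
-- ===== SOURCE B (Python) =====
-- def solution(string1, string2):
--     if not string1: return string2
--     if not string2: return string1
--     ranked = [(2 * k, w) for k, w in enumerate(string1.split(" "))]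
--     ranked += [(2 * k + 1, w) for k, w in enumerate(string2.split(" "))]
--     ranked.sort(key=lambda t: t[0])
--     return " ".join(w for _, w in ranked)
-- ===== Notes on version B (the rewrite author's own statement) =====
-- stated objective: alternative
-- what changed: Replaces the twin-index while loop by decorate-sort-undecorate: words of string1 get even ranks 2k and words of string2 odd ranks 2k+1, the two ranked lists are concatenated, sorted by rank, and the words joined.
import Mathlib
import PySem

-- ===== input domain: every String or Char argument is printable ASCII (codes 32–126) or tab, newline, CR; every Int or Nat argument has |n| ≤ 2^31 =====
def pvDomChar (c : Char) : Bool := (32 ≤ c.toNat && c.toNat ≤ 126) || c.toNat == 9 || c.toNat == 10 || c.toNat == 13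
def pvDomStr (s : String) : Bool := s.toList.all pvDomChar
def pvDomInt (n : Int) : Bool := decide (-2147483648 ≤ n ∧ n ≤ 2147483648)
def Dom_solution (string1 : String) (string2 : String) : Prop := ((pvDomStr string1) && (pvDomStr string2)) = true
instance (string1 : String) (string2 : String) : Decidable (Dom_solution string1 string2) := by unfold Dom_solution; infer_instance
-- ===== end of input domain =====

-- B replaces A's twin-index while loop by decorate-sort-undecorate: words of string1
-- get even ranks, words of string2 odd ranks, sort by rank, join (alternative algorithm).


-- ===== PORT A =====
-- the while loop: each pass appends s1[i] (if i in range) then s2[j] (if j in range);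
-- transliterated as recursion on the unconsumed tails of s1 and s2
def solutionLoop : List String → List String → List String
  | [], [] => []
  | a :: as, [] => a :: solutionLoop as []
  | [], b :: bs => b :: solutionLoop [] bs
  | a :: as, b :: bs => a :: b :: solutionLoop as bs

def solution (string1 : String) (string2 : String) : String :=
  if string1 = "" then string2
  else if string2 = "" then string1
  else
    let s1 := (PySem.Chars.splitOn string1.toList " ".toList).map String.ofList
    let s2 := (PySem.Chars.splitOn string2.toList " ".toList).map String.ofList
    PySem.Str.join " " (solutionLoop s1 s2)

-- ===== PORT B =====
-- decorate (even ranks 2k for s1, odd ranks 2k+1 for s2), concatenate, sort by rank, undecorate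
def solution_alt (string1 : String) (string2 : String) : String :=
  if string1 = "" then string2
  else if string2 = "" then string1
  else
    let s1 := (PySem.Chars.splitOn string1.toList " ".toList).map String.ofList
    let s2 := (PySem.Chars.splitOn string2.toList " ".toList).map String.ofList
    let ranked : List (Int × String) :=
      (PySem.List.enumerate s1).map (fun p => (2 * p.1, p.2)) ++
      (PySem.List.enumerate s2).map (fun p => (2 * p.1 + 1, p.2))
    PySem.Str.join " " ((PySem.List.sorted ranked (fun t => t.1) false).map (fun t => t.2))

-- ===== PRECONDITION & SPEC =====
def Spec_solution (string1 : String) (string2 : String) (out : String) : Prop := out = solution_alt string1 string2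
instance (string1 : String) (string2 : String) (out : String) : Decidable (Spec_solution string1 string2 out) := by unfold Spec_solution; infer_instance

-- ===== CLAIM (what is proved, stated in full; the proofs are below) =====
def Claim_equal_solution : Prop := ∀ (string1 : String) (string2 : String), Dom_solution string1 string2 → Spec_solution string1 string2 (solution string1 string2)

-- ===== LEMMAS AND PROOFS =====
-- the interleave of as and bs, decorated with the ranks B assigns (2k / 2k+1 at depth k):
-- the strictly rank-increasing rearrangement that names B's sorted order
def ilv : Int → List String → List String → List (Int × String)
  | _, [], [] => []
  | k, a :: as, [] => (2 * k, a) :: ilv (k + 1) as []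
  | k, [], b :: bs => (2 * k + 1, b) :: ilv (k + 1) [] bs
  | k, a :: as, b :: bs => (2 * k, a) :: (2 * k + 1, b) :: ilv (k + 1) as bs

theorem ilv_snd (as bs : List String) (k : Int) :
    (ilv k as bs).map Prod.snd = solutionLoop as bs := by
  induction as generalizing bs k with
  | nil =>
    induction bs generalizing k with
    | nil => simp [ilv, solutionLoop]
    | cons b bs ih => simp [ilv, solutionLoop, ih]
  | cons a as iha =>
    cases bs with
    | nil => simp [ilv, solutionLoop, iha]
    | cons b bs => simp [ilv, solutionLoop, iha]

theorem ilv_perm (as bs : List String) (k : Int) :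
    (ilv k as bs).Perm
      ((PySem.List.enumerate as k).map (fun p => (2 * p.1, p.2)) ++
       (PySem.List.enumerate bs k).map (fun p => (2 * p.1 + 1, p.2))) := by
  induction as generalizing bs k with
  | nil =>
    induction bs generalizing k with
    | nil => simp [ilv, PySem.List.enumerate]
    | cons b bs ih =>
      simpa [ilv, PySem.List.enumerate] using (ih (k + 1)).cons (2 * k + 1, b)
  | cons a as iha =>
    cases bs with
    | nil =>
      simpa [ilv, PySem.List.enumerate] using (iha [] (k + 1)).cons (2 * k, a)
    | cons b bs =>
      have h := ((iha bs (k + 1)).cons (2 * k + 1, b)).trans List.perm_middle.symm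
      simpa [ilv, PySem.List.enumerate] using h.cons (2 * k, a)

theorem ilv_lb (as bs : List String) (k : Int) :
    ∀ p ∈ ilv k as bs, 2 * k ≤ p.1 := by
  induction as generalizing bs k with
  | nil =>
    induction bs generalizing k with
    | nil => simp [ilv]
    | cons b bs ih =>
      intro p hp
      simp only [ilv, List.mem_cons] at hp
      rcases hp with rfl | hp
      · omega
      · have := ih (k + 1) p hp; omega
  | cons a as iha =>
    cases bs with
    | nil =>
      intro p hp
      simp only [ilv, List.mem_cons] at hp
      rcases hp with rfl | hp
      · omega
      · have := iha [] (k + 1) p hp; omega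
    | cons b bs =>
      intro p hp
      simp only [ilv, List.mem_cons] at hp
      rcases hp with rfl | rfl | hp
      · omega
      · omega
      · have := iha bs (k + 1) p hp; omega

theorem ilv_pairwise (as bs : List String) (k : Int) :
    (ilv k as bs).Pairwise (fun x y => x.1 < y.1) := by
  induction as generalizing bs k with
  | nil =>
    induction bs generalizing k with
    | nil => simp [ilv]
    | cons b bs ih =>
      simp only [ilv]
      refine List.Pairwise.cons ?_ (ih (k + 1))
      intro p hp
      have := ilv_lb [] bs (k + 1) p hp; simpa using by omega
  | cons a as iha =>
    cases bs with
    | nil =>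
      simp only [ilv]
      refine List.Pairwise.cons ?_ (iha [] (k + 1))
      intro p hp
      have := ilv_lb as [] (k + 1) p hp; simpa using by omega
    | cons b bs =>
      simp only [ilv]
      refine List.Pairwise.cons ?_ (List.Pairwise.cons ?_ (iha bs (k + 1)))
      · intro p hp
        simp only [List.mem_cons] at hp
        rcases hp with rfl | hp
        · simp
        · have := ilv_lb as bs (k + 1) p hp; simpa using by omega
      · intro p hp
        have := ilv_lb as bs (k + 1) p hp; simpa using by omega

theorem sorted_ranked (as bs : List String) :
    PySem.List.sorted
      ((PySem.List.enumerate as).map (fun p => (2 * p.1, p.2)) ++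
       (PySem.List.enumerate bs).map (fun p => (2 * p.1 + 1, p.2)))
      (fun t => t.1) false = ilv 0 as bs :=
  PySem.List.sorted_eq_of_perm_of_pairwise_lt _ _ _ (ilv_perm as bs 0) (ilv_pairwise as bs 0)

-- ===== VERDICT (by name: the statement is the Claim_ definition above) =====
theorem solution_spec : Claim_equal_solution := by
  intro string1 string2 _
  unfold Spec_solution solution solution_alt
  split_ifs with h1 h2
  · rfl
  · rfl
  · simp only [sorted_ranked, ilv_snd]
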